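-- pv_equiv track=rewrite | github.com/lucasmiachon-blip/OLMO_PROMETEUS | lab/wiki-graph-lab/build_graph_data.py | summarize_markdown
-- ===== SOURCE A (Python) =====
-- def summarize_markdown(body: str) -> tuple[str, str]:
--     lines = [line.rstrip() for line in body.splitlines()]
--     clean_blocks: list[str] = []
--     buffer: list[str] = []
--
--     for line in lines:
--         stripped = line.strip()
--         if not stripped:
--             if buffer:
--                 clean_blocks.append(" ".join(buffer).strip())
--                 buffer = []
--             continue
--         if stripped.startswith("#") or stripped.startswith("- ") or stripped.startswith("|") or stripped.startswith("```"):
--             if buffer: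
--                 clean_blocks.append(" ".join(buffer).strip())
--                 buffer = []
--             continue
--         buffer.append(stripped)
--
--     if buffer:
--         clean_blocks.append(" ".join(buffer).strip())
--
--     summary = clean_blocks[0] if clean_blocks else ""
--     teaser = " ".join(clean_blocks[:2]).strip()
--     return summary[:260], teaser[:420]
-- ===== SOURCE B (Python) =====
-- from itertools import groupby
--
--
-- def _is_content(line: str) -> bool:
--     s = line.strip()
--     return bool(s) and not (s.startswith("#") or s.startswith("- ")
--                             or s.startswith("|") or s.startswith("```"))
--
--
-- def summarize_markdown(body: str) -> tuple[str, str]: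
--     lines = [line.rstrip() for line in body.splitlines()]
--     clean_blocks = [
--         " ".join(l.strip() for l in group).strip()
--         for key, group in groupby(lines, key=_is_content) if key
--     ]
--     summary = clean_blocks[0][:260] if clean_blocks else ""
--     teaser = " ".join(clean_blocks[:2]).strip()[:420]
--     return summary, teaser
-- ===== Notes on version B (the rewrite author's own statement) =====
-- stated objective: idiomatic
-- what changed: Replaces A's stateful buffer-accumulate-and-flush loop over lines with a group-by-content partition (itertools.groupby keyed on an is_content predicate) and a comprehension that joins each content run into a block.
import Mathlib
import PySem

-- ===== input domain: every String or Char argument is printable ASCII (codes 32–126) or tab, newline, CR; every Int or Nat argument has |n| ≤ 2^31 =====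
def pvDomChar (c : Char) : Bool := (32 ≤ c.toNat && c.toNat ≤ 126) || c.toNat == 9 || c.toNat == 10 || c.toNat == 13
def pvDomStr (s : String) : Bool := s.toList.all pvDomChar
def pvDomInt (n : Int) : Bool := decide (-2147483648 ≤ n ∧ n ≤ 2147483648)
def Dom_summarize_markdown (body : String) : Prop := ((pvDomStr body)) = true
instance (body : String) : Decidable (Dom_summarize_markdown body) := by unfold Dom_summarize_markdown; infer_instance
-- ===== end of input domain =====

-- B replaces A's stateful buffer-flush loop by a group-by-content partition of the
-- lines (itertools.groupby) plus a comprehension; objective: more idiomatic, same cost.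

-- ===== PORT A =====
-- A's per-line loop over (clean_blocks, buffer); branches in Python's order.
def smLoopA : List String → List String × List String → List String × List String
  | [], st => st
  | line :: rest, (cb, buf) =>
    let stripped := PySem.Str.strip line
    if stripped = "" then
      smLoopA rest
        (if buf.isEmpty then (cb, buf)
         else (cb ++ [PySem.Str.strip (PySem.Str.join " " buf)], []))
    else if PySem.Str.startswith stripped "#" || PySem.Str.startswith stripped "- " ||
            PySem.Str.startswith stripped "|" || PySem.Str.startswith stripped "```" then
      smLoopA rest
        (if buf.isEmpty then (cb, buf)
         else (cb ++ [PySem.Str.strip (PySem.Str.join " " buf)], []))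
    else
      smLoopA rest (cb, buf ++ [stripped])

def summarize_markdown (body : String) : String × String :=
  let lines := (PySem.Str.splitlines body).map PySem.Str.rstrip
  let st := smLoopA lines ([], [])
  let clean_blocks :=
    if st.2.isEmpty then st.1
    else st.1 ++ [PySem.Str.strip (PySem.Str.join " " st.2)]
  let summary := match clean_blocks with | [] => "" | b :: _ => b
  let teaser := PySem.Str.strip (PySem.Str.join " " (PySem.List.slice clean_blocks none (some 2)))
  (PySem.Str.slice summary none (some 260), PySem.Str.slice teaser none (some 420))

-- ===== PORT B =====
def smIsContent (line : String) : Bool :=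
  let s := PySem.Str.strip line
  !(s = "") && !(PySem.Str.startswith s "#" || PySem.Str.startswith s "- " ||
                 PySem.Str.startswith s "|" || PySem.Str.startswith s "```")

-- groupby(lines, key=smIsContent), keeping only the groups whose key is True
def smGroups : List String → List (List String)
  | [] => []
  | l :: ls =>
    if smIsContent l then
      (l :: ls.takeWhile smIsContent) :: smGroups (ls.dropWhile smIsContent)
    else
      smGroups ls
termination_by ls => ls.length
decreasing_by
  · have := List.length_dropWhile_le smIsContent ls; simp; omega
  · simp

def summarize_markdown_alt (body : String) : String × String :=
  let lines := (PySem.Str.splitlines body).map PySem.Str.rstrip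
  let clean_blocks := (smGroups lines).map
    (fun g => PySem.Str.strip (PySem.Str.join " " (g.map PySem.Str.strip)))
  let summary := match clean_blocks with
    | [] => ""
    | b :: _ => PySem.Str.slice b none (some 260)
  let teaser := PySem.Str.slice
    (PySem.Str.strip (PySem.Str.join " " (PySem.List.slice clean_blocks none (some 2))))
    none (some 420)
  (summary, teaser)

-- ===== PRECONDITION & SPEC =====
def Spec_summarize_markdown (body : String) (out : String × String) : Prop := out = summarize_markdown_alt body
instance (body : String) (out : String × String) : Decidable (Spec_summarize_markdown body out) := by unfold Spec_summarize_markdown; infer_instance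

-- ===== CLAIM (what is proved, stated in full; the proofs are below) =====
def Claim_equal_summarize_markdown : Prop := ∀ (body : String), Dom_summarize_markdown body → Spec_summarize_markdown body (summarize_markdown body)

-- ===== LEMMAS AND PROOFS =====

def smBk (buf : List String) : String := PySem.Str.strip (PySem.Str.join " " buf)

def smBkAll (g : List String) : String := smBk (g.map PySem.Str.strip)

-- A's remaining blocks given the pending buffer and the remaining lines
def smCont : List String → List String → List String
  | buf, [] => if buf.isEmpty then [] else [smBk buf]
  | buf, l :: ls =>
    if smIsContent l then smCont (buf ++ [PySem.Str.strip l]) ls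
    else (if buf.isEmpty then [] else [smBk buf]) ++ smCont [] ls

def smFin (st : List String × List String) : List String :=
  if st.2.isEmpty then st.1 else st.1 ++ [smBk st.2]

theorem smLoopA_fin (lines : List String) :
    ∀ cb buf, smFin (smLoopA lines (cb, buf)) = cb ++ smCont buf lines := by
  induction lines with
  | nil => intro cb buf; simp [smLoopA, smFin, smCont]; split <;> simp
  | cons l ls ih =>
    intro cb buf
    by_cases hc : smIsContent l = true
    · have h1 : ¬ PySem.Str.strip l = "" := by
        intro h; simp [smIsContent, h] at hc
      have h2 : ¬ ((PySem.Str.startswith (PySem.Str.strip l) "#" ||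
          PySem.Str.startswith (PySem.Str.strip l) "- " ||
          PySem.Str.startswith (PySem.Str.strip l) "|" ||
          PySem.Str.startswith (PySem.Str.strip l) "```") = true) := by
        intro ho
        simp [smIsContent] at hc
        simp at ho
        rcases ho with ((h | h) | h) | h <;> simp [h] at hc
      have step : smLoopA (l :: ls) (cb, buf) = smLoopA ls (cb, buf ++ [PySem.Str.strip l]) := by
        simp only [smLoopA]
        rw [if_neg h1, if_neg h2]
      rw [step, ih cb (buf ++ [PySem.Str.strip l])]
      simp only [smCont, hc, ite_true]
    · have step : smLoopA (l :: ls) (cb, buf) =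
          smLoopA ls (if buf.isEmpty then (cb, buf)
            else (cb ++ [PySem.Str.strip (PySem.Str.join " " buf)], [])) := by
        by_cases h1 : PySem.Str.strip l = ""
        · simp only [smLoopA]; rw [if_pos h1]
        · have h2 : (PySem.Str.startswith (PySem.Str.strip l) "#" ||
              PySem.Str.startswith (PySem.Str.strip l) "- " ||
              PySem.Str.startswith (PySem.Str.strip l) "|" ||
              PySem.Str.startswith (PySem.Str.strip l) "```") = true := by
            by_contra hno
            have ho : (PySem.Str.startswith (PySem.Str.strip l) "#" ||
                PySem.Str.startswith (PySem.Str.strip l) "- " ||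
                PySem.Str.startswith (PySem.Str.strip l) "|" ||
                PySem.Str.startswith (PySem.Str.strip l) "```") = false := by
              simpa using hno
            apply hc
            simp at ho
            obtain ⟨⟨⟨ha, hb⟩, hc'⟩, hd⟩ := ho
            simp [smIsContent, h1, ha, hb, hc', hd]
          simp only [smLoopA]
          rw [if_neg h1, if_pos h2]
      rw [step]
      by_cases hb : buf.isEmpty
      · have hbe : buf = [] := by simpa [List.isEmpty_iff] using hb
        simp only [hb, ite_true]
        rw [ih cb buf]
        simp [smCont, hc, hbe]
      · simp only [hb, Bool.false_eq_true, ite_false]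
        rw [ih (cb ++ [PySem.Str.strip (PySem.Str.join " " buf)]) []]
        simp only [smCont, hc, Bool.false_eq_true, ite_false, smBk]
        simp [List.isEmpty_iff] at hb ⊢
        simp [hb]

theorem smCont_eq_groups (lines : List String) :
    (∀ buf, buf ≠ [] →
      smCont buf lines =
        smBk (buf ++ (lines.takeWhile smIsContent).map PySem.Str.strip) ::
          (smGroups (lines.dropWhile smIsContent)).map smBkAll) ∧
    smCont [] lines = (smGroups lines).map smBkAll := by
  induction lines with
  | nil =>
    constructor
    · intro buf hb
      simp [smCont, smGroups, List.isEmpty_iff, hb]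
    · simp [smCont, smGroups]
  | cons l ls ih =>
    by_cases hc : smIsContent l = true
    · constructor
      · intro buf hb
        simp only [smCont, hc, ite_true, List.takeWhile_cons, List.dropWhile_cons]
        rw [(ih.1 (buf ++ [PySem.Str.strip l]) (by simp))]
        simp
      · simp only [smCont, hc, ite_true, List.nil_append]
        rw [(ih.1 [PySem.Str.strip l] (by simp))]
        rw [smGroups]
        simp [hc, smBkAll]
    · constructor
      · intro buf hb
        simp only [smCont, hc, Bool.false_eq_true, ite_false, List.isEmpty_iff, hb,
          List.takeWhile_cons, List.dropWhile_cons]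
        rw [ih.2, smGroups]
        simp [hc]
      · simp only [smCont, hc, Bool.false_eq_true, ite_false, List.isEmpty_iff]
        rw [ih.2, smGroups]
        simp [hc]

theorem clean_blocks_eq (lines : List String) :
    smFin (smLoopA lines ([], [])) = (smGroups lines).map
      (fun g => PySem.Str.strip (PySem.Str.join " " (g.map PySem.Str.strip))) := by
  rw [smLoopA_fin lines [] []]
  have h := (smCont_eq_groups lines).2
  rw [List.nil_append, h]
  simp [smBkAll, smBk]

-- ===== VERDICT (by name: the statement is the Claim_ definition above) =====
theorem summarize_markdown_spec : Claim_equal_summarize_markdown := by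
  intro body _
  unfold Spec_summarize_markdown summarize_markdown summarize_markdown_alt
  have h := clean_blocks_eq ((PySem.Str.splitlines body).map PySem.Str.rstrip)
  simp only [smFin, smBk] at h
  simp only []
  rw [h]
  cases hg : (smGroups ((PySem.Str.splitlines body).map PySem.Str.rstrip)).map
      (fun g => PySem.Str.strip (PySem.Str.join " " (g.map PySem.Str.strip))) with
  | nil => exact Prod.ext (by decide) rfl
  | cons b t => rfl
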